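-- pv_equiv track=rewrite | github.com/hmc-cs111-spring2023/artifact-cgcouto | parseGame.py | split_into_rooms
-- ===== SOURCE A (Python) =====
-- def split_into_rooms(data):
--     room_tags = []
--     for i in range(len(data)):
--         # Tell room tags based on whether it's surrounded by angled brackets
--         # There's probably a better way to do this...
--         if data[i][0] == "<" and data[i][len(data[i])-1] == ">":
--             room_tags.append(i)
--
--     # Add the end of the data so we can stop in the for loop below
--     room_tags.append(len(data))
--
--     # Pull out the relevant intervals of data for each parsed room tag
--     split_data = []
--     for j in range(len(room_tags)-1):
--         split_data.append(data[room_tags[j]:room_tags[j+1]])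
--     return split_data
-- ===== SOURCE B (Python) =====
-- def split_into_rooms(data):
--     # Single streaming pass: start a new room at each <tag>, append other
--     # elements to the current room; elements before the first tag are dropped.
--     rooms = []
--     for x in data:
--         if x[0] == "<" and x[-1] == ">":
--             rooms.append([x])
--         elif rooms:
--             rooms[-1].append(x)
--     return rooms
-- ===== Notes on version B (the rewrite author's own statement) =====
-- stated objective: simpler
-- what changed: Replaces A's two-phase build-tag-index-list-then-slice with a single streaming pass that opens a new room at each <tag> element and appends other elements to the current last room (elements before the first tag are dropped, as in A).
import Mathlib
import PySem

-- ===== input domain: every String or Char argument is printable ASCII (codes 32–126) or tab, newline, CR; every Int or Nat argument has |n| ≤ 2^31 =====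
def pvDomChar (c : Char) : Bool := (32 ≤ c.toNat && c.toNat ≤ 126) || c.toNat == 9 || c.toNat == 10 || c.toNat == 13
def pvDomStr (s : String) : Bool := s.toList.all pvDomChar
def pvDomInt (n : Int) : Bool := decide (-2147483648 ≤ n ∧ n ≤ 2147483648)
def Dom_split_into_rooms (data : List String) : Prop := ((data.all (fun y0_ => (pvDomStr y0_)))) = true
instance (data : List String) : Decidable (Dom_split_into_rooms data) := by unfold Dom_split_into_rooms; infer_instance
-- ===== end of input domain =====

-- B replaces A's build-tag-index-then-slice with a single streaming pass that
-- starts a new room at each tag and appends other elements to the last room (objective: simpler one-pass decomposition).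


-- ===== PORT A =====
-- data[i][0] == "<" and data[i][len(data[i])-1] == ">"  (s = data[i], already fetched)
def pvTagA (s : String) : Bool :=
  PySem.Str.pyGet? s 0 == some '<' && PySem.Str.pyGet? s (PySem.Str.len s - 1) == some '>'

def split_into_rooms (data : List String) : List (List String) :=
  let room_tags : List Int :=
    (PySem.List.pyRange 0 (PySem.List.len data) 1).foldl
      (fun acc i => if pvTagA (PySem.List.pyGetD data i "") then acc ++ [i] else acc) []
  let room_tags := room_tags ++ [PySem.List.len data]
  (PySem.List.pyRange 0 (PySem.List.len room_tags - 1) 1).foldl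
    (fun acc j =>
      acc ++ [PySem.List.slice data (some (PySem.List.pyGetD room_tags j 0))
                                    (some (PySem.List.pyGetD room_tags (j+1) 0))]) []

-- ===== PORT B =====
-- x[0] == "<" and x[-1] == ">"
def pvTagB (x : String) : Bool :=
  PySem.Str.pyGet? x 0 == some '<' && PySem.Str.pyGet? x (-1) == some '>'

-- rooms[-1].append(x)  (in-place append to the last room)
def pvAppendLast (rooms : List (List String)) (x : String) : List (List String) :=
  match rooms with
  | [] => []
  | [r] => [r ++ [x]]
  | r :: rs => r :: pvAppendLast rs x

def split_into_rooms_alt (data : List String) : List (List String) :=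
  data.foldl
    (fun rooms x =>
      if pvTagB x then rooms ++ [[x]]
      else match rooms with
           | [] => []
           | _ => pvAppendLast rooms x) []

-- ===== PRECONDITION & SPEC =====
-- Pre_ excludes lists containing an empty-string element: there both Pythons raise IndexError
-- (A on data[i][0], B on x[0]).
def Pre_split_into_rooms (data : List String) : Prop := ∀ s ∈ data, s ≠ ""
instance (data : List String) : Decidable (Pre_split_into_rooms data) := by unfold Pre_split_into_rooms; infer_instance
def pvWitness_split_into_rooms : List String := ["<a>", "x", "<b>"]
def Spec_split_into_rooms (data : List String) (out : List (List String)) : Prop := out = split_into_rooms_alt data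
instance (data : List String) (out : List (List String)) : Decidable (Spec_split_into_rooms data out) := by unfold Spec_split_into_rooms; infer_instance

-- ===== CLAIM (what is proved, stated in full; the proofs are below) =====
def Claim_equal_split_into_rooms : Prop := ∀ (data : List String), Dom_split_into_rooms data → Pre_split_into_rooms data → Spec_split_into_rooms data (split_into_rooms data)

-- ===== LEMMAS AND PROOFS =====

-- proof-side helpers
def pvIdxs (data : List String) : List Int :=
  (PySem.List.pyRange 0 (PySem.List.len data) 1).filter
    (fun i => pvTagA (PySem.List.pyGetD data i ""))

def pvPairs (data : List String) (ts : List Int) : List (List String) :=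
  List.zipWith (fun a b => PySem.List.slice data (some a) (some b)) ts ts.tail

def pvStep (rooms : List (List String)) (x : String) : List (List String) :=
  if pvTagB x then rooms ++ [[x]]
  else match rooms with
       | [] => []
       | _ => pvAppendLast rooms x

lemma pvTag_eq (s : String) : pvTagA s = pvTagB s := by
  unfold pvTagA pvTagB
  rcases Nat.eq_zero_or_pos s.toList.length with h | h
  · rw [PySem.Str.len_eq, h]
    norm_num
  · have h1 : PySem.Str.len s - 1 = ((s.toList.length - 1 : Nat) : Int) := by
      rw [PySem.Str.len_eq]; omega
    rw [h1]
    congr 1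
    simp [pysem, List.getLast?_eq_getElem?]

lemma pvAppendLast_snoc (l : List (List String)) (r : List String) (x : String) :
    pvAppendLast (l ++ [r]) x = l ++ [r ++ [x]] := by
  induction l with
  | nil => rfl
  | cons a l ih =>
    cases l with
    | nil => simp [pvAppendLast]
    | cons b l => simpa [pvAppendLast] using ih

lemma pvStep_eq (rooms : List (List String)) (x : String) :
    pvStep rooms x = if pvTagB x then rooms ++ [[x]] else pvAppendLast rooms x := by
  cases rooms with
  | nil => cases htag : pvTagB x <;> simp [pvStep, pvAppendLast, htag]
  | cons a l => cases l <;> cases htag : pvTagB x <;> simp [pvStep, htag]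

lemma alt_snoc (data : List String) (x : String) :
    split_into_rooms_alt (data ++ [x]) = pvStep (split_into_rooms_alt data) x := by
  unfold split_into_rooms_alt
  rw [List.foldl_append]
  rfl

lemma map_range_adj {γ : Type} (f : Int → Int → γ) (d : Int) :
    ∀ ts : List Int,
      (List.range (ts.length - 1)).map (fun k => f (ts.getD k d) (ts.getD (k+1) d)) =
        List.zipWith f ts ts.tail
  | [] => by simp
  | [a] => by simp
  | a :: b :: ts => by
    have ih := map_range_adj f d (b :: ts)
    simp only [List.length_cons, Nat.add_sub_cancel] at ih ⊢
    rw [List.range_succ_eq_map]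
    simp only [List.map_cons, List.map_map, List.getD_cons_zero, List.getD_cons_succ]
    have hfun : ((fun k => f ((a :: b :: ts).getD k d) ((b :: ts).getD k d)) ∘ Nat.succ)
        = (fun k => f ((b :: ts).getD k d) ((b :: ts).getD (k+1) d)) := by
      funext k
      simp [Nat.succ_eq_add_one]
    rw [hfun, ih]
    rfl

lemma pyRange_map_adj {γ : Type} (f : Int → Int → γ) (ts : List Int) :
    (PySem.List.pyRange 0 (PySem.List.len ts - 1) 1).map
        (fun j => f (PySem.List.pyGetD ts j 0) (PySem.List.pyGetD ts (j+1) 0)) =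
      List.zipWith f ts ts.tail := by
  cases ts with
  | nil =>
    rw [PySem.List.len_eq]
    norm_num [PySem.List.pyRange_one_eq_nil]
  | cons a ts' =>
    have h : PySem.List.len (a :: ts') - 1 = ((ts'.length : Nat) : Int) := by
      rw [PySem.List.len_eq]
      simp [List.length_cons]
    rw [h, PySem.List.pyRange_zero_natCast, List.map_map]
    have hfun : ((fun j => f (PySem.List.pyGetD (a :: ts') j 0) (PySem.List.pyGetD (a :: ts') (j+1) 0))
          ∘ fun (k : Nat) => (k : Int))
        = (fun k => f ((a :: ts').getD k 0) ((a :: ts').getD (k+1) 0)) := by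
      funext k
      simp only [Function.comp_apply]
      rw [show ((k : Int) + 1) = ((k + 1 : Nat) : Int) from by push_cast; ring,
          PySem.List.pyGetD_natCast, PySem.List.pyGetD_natCast]
    rw [hfun]
    have h2 := map_range_adj f 0 (a :: ts')
    rw [show (a :: ts').length - 1 = ts'.length from rfl] at h2
    exact h2

lemma A_eq (data : List String) :
    split_into_rooms data = pvPairs data (pvIdxs data ++ [PySem.List.len data]) := by
  unfold split_into_rooms
  rw [PySem.List.foldl_append_if_eq_filter, List.nil_append,
      PySem.List.foldl_append_singleton_eq_map, List.nil_append,
      pyRange_map_adj (fun a b => PySem.List.slice data (some a) (some b))]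
  rfl

lemma pvIdxs_mem (data : List String) {i : Int} (hi : i ∈ pvIdxs data) :
    0 ≤ i ∧ i < (data.length : Int) := by
  unfold pvIdxs at hi
  have := List.mem_filter.mp hi |>.1
  rw [PySem.List.len_eq] at this
  exact PySem.List.mem_pyRange_one.mp this

lemma pvIdxs_snoc (data : List String) (x : String) :
    pvIdxs (data ++ [x]) = pvIdxs data ++ (if pvTagA x then [PySem.List.len data] else []) := by
  unfold pvIdxs
  have hlen : PySem.List.len (data ++ [x]) = PySem.List.len data + 1 := by
    simp [PySem.List.len_eq]
  rw [hlen, PySem.List.pyRange_one_succ_right (by rw [PySem.List.len_eq]; exact Int.natCast_nonneg _),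
      List.filter_append]
  congr 1
  · apply List.filter_congr
    intro i hi
    rw [PySem.List.mem_pyRange_one, PySem.List.len_eq] at hi
    have h1 : PySem.List.pyGetD (data ++ [x]) i "" = PySem.List.pyGetD data i "" := by
      rw [PySem.List.pyGetD_eq_getElem _ _ hi.1 (by simp; omega),
          PySem.List.pyGetD_eq_getElem _ _ hi.1 (by exact_mod_cast hi.2)]
      exact List.getElem_append_left _
    rw [h1]
  · simp [List.filter]
    cases pvTagA x <;> simp

lemma pvPairs_snoc (data : List String) :
    ∀ (ts : List Int) (h : ts ≠ []) (b : Int),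
      pvPairs data (ts ++ [b]) =
        pvPairs data ts ++ [PySem.List.slice data (some (ts.getLast h)) (some b)]
  | [], h, _ => absurd rfl h
  | [a], _, b => by simp [pvPairs]
  | a :: c :: ts, _, b => by
    have ih := pvPairs_snoc data (c :: ts) (by simp) b
    simp only [pvPairs, List.cons_append, List.tail_cons, List.zipWith_cons_cons] at ih ⊢
    rw [ih]
    simp [List.getLast]

lemma slice_ext (data : List String) (x : String) {a b : Int}
    (ha : 0 ≤ a) (hb : 0 ≤ b) (hbn : b ≤ (data.length : Int)) :
    PySem.List.slice (data ++ [x]) (some a) (some b) = PySem.List.slice data (some a) (some b) := by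
  rw [PySem.List.slice_toNat _ ha hb, PySem.List.slice_toNat _ ha hb]
  rcases Nat.lt_or_ge a.toNat b.toNat with h | h
  · have ha' : a.toNat ≤ data.length := by omega
    rw [List.drop_append_of_le_length ha',
        List.take_append_of_le_length (by rw [List.length_drop]; omega)]
  · simp [Nat.sub_eq_zero_of_le h]

lemma pvPairs_ext (data : List String) (x : String) :
    ∀ ts : List Int, (∀ t ∈ ts, 0 ≤ t ∧ t ≤ (data.length : Int)) →
      pvPairs (data ++ [x]) ts = pvPairs data ts
  | [], _ => rfl
  | [a], _ => rfl
  | a :: c :: ts, hmem => by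
    have ih := pvPairs_ext data x (c :: ts) (fun t ht => hmem t (List.mem_cons_of_mem a ht))
    have ha := hmem a (by simp)
    have hc := hmem c (by simp)
    simp only [pvPairs, List.tail_cons, List.zipWith_cons_cons] at ih ⊢
    rw [ih, slice_ext data x ha.1 hc.1 hc.2]

lemma slice_last (data : List String) (x : String) {a : Int}
    (ha : 0 ≤ a) (han : a ≤ (data.length : Int)) :
    PySem.List.slice (data ++ [x]) (some a) (some ((data.length : Int) + 1)) =
      PySem.List.slice data (some a) (some (data.length : Int)) ++ [x] := by
  rw [PySem.List.slice_toNat _ ha (by omega), PySem.List.slice_toNat _ ha (by omega)]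
  have ha' : a.toNat ≤ data.length := by omega
  rw [List.drop_append_of_le_length ha']
  rw [List.take_of_length_le (by simp [List.length_drop]; omega),
      List.take_of_length_le (by rw [List.length_drop]; omega)]

lemma A_snoc (data : List String) (x : String) :
    split_into_rooms (data ++ [x]) = pvStep (split_into_rooms data) x := by
  rw [A_eq, A_eq, pvIdxs_snoc, pvStep_eq, ← pvTag_eq x]
  have hlen : PySem.List.len (data ++ [x]) = (data.length : Int) + 1 := by
    simp [PySem.List.len_eq]
  have hlen' : PySem.List.len data = (data.length : Int) := PySem.List.len_eq data
  rw [hlen, hlen']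
  have hbound : ∀ t ∈ pvIdxs data ++ [(data.length : Int)], 0 ≤ t ∧ t ≤ (data.length : Int) := by
    intro t ht
    rcases List.mem_append.mp ht with ht | ht
    · have := pvIdxs_mem data ht; exact ⟨this.1, le_of_lt this.2⟩
    · simp only [List.mem_singleton] at ht
      subst ht
      exact ⟨Int.natCast_nonneg _, le_refl _⟩
  by_cases htag : pvTagA x = true
  case neg =>
    -- not a tag
    rw [if_neg htag, if_neg htag]
    simp only [List.append_nil]
    rcases List.eq_nil_or_concat (pvIdxs data) with hnil | ⟨is, i0, his⟩
    
    · rw [hnil]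
      simp [pvPairs, pvAppendLast]
    · rw [List.concat_eq_append] at his
      rw [his]
      have hi0 : 0 ≤ i0 ∧ i0 < (data.length : Int) := pvIdxs_mem data (his ▸ (by simp))
      rw [pvPairs_snoc _ (is ++ [i0]) (by simp) ((data.length : Int) + 1),
          pvPairs_snoc _ (is ++ [i0]) (by simp) (data.length : Int),
          List.getLast_concat]
      rw [pvPairs_ext data x (is ++ [i0])
            (fun t ht => hbound t (List.mem_append.mpr (Or.inl (his ▸ ht))))]
      rw [slice_last data x hi0.1 (le_of_lt hi0.2)]
      rw [pvAppendLast_snoc]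
  case pos =>
    -- a tag
    rw [if_pos htag, if_pos htag]
    rw [pvPairs_snoc _ (pvIdxs data ++ [(data.length : Int)]) (by simp) ((data.length : Int) + 1),
        List.getLast_concat]
    rw [pvPairs_ext data x (pvIdxs data ++ [(data.length : Int)]) hbound]
    rw [slice_last data x (Int.natCast_nonneg _) (le_refl _)]
    have hself : PySem.List.slice data (some (data.length : Int)) (some (data.length : Int)) = [] := by
      rw [PySem.List.slice_toNat _ (Int.natCast_nonneg _) (Int.natCast_nonneg _)]
      simp
    rw [hself]
    rfl

lemma main_eq : ∀ data : List String, split_into_rooms data = split_into_rooms_alt data := by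
  intro data
  induction data using List.reverseRecOn with
  | nil => rfl
  | append_singleton data x ih => rw [A_snoc, alt_snoc, ih]

-- ===== VERDICT (by name: the statement is the Claim_ definition above) =====
theorem split_into_rooms_spec : Claim_equal_split_into_rooms := by
  intro data _ _
  exact main_eq data
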